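-- pv_equiv track=rewrite | github.com/mdelgado509/EPIJudge | epi_judge_python/reverse_bits.py | populate_reverse_bits
-- ===== SOURCE A (Python) =====
-- def populate_reverse_bits(x: int) -> int:
--     """
--     This is the brute force solution to reversing a 64-bit input by bits
--     """
--     # set size to bit length of input
--     # in this case we want to populate a 16-bite precomputed cache
--     size = 16
--     # the position variable keeps track of the MSB -> LSB index of the output
--     # reversed bit order binary number
--     position = size - 1
--     # the result is OR
--     result = 0
--     while position >= 0:
--         result |= ((x & 1) << position)
--         x >>= 1
--         position -= 1
--     return result
-- ===== SOURCE B (Python) =====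
-- _REV8 = [int(format(i, '08b')[::-1], 2) for i in range(256)]
--
--
-- def populate_reverse_bits(x: int) -> int:
--     hi, lo = divmod(x & 0xFFFF, 256)
--     return _REV8[lo] * 256 + _REV8[hi]
-- ===== Notes on version B (the rewrite author's own statement) =====
-- stated objective: alternative
-- what changed: Replaced A's 16-iteration MSB-to-LSB shift-and-or loop with a precomputed 256-entry byte-reversal lookup table (built once via binary string formatting and reversed-string parsing); each call splits the masked value into two bytes with divmod and combines two table lookups.
import Mathlib
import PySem

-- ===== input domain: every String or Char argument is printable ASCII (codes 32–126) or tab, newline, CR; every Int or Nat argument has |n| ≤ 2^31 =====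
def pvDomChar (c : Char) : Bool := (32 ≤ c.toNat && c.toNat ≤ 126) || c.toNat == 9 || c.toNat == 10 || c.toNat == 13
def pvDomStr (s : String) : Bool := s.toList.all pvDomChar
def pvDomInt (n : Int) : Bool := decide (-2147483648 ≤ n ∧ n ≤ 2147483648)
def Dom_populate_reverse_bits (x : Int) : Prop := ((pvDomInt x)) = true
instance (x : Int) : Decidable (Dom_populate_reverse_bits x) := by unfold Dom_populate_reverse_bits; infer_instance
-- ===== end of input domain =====

-- ===== PORT A =====
-- B replaces A's 16-iteration MSB->LSB bit loop with a precomputed 256-entry byte-reversal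
-- table (built by binary string formatting and reversed-string parsing) plus a byte split;
-- objective: alternative (2 table lookups per call instead of a 16-step loop; speed not measured).

-- A's while loop: fuel = position + 1 (position runs 15, 14, …, 0)
def pvALoop (x result : Int) : Nat → Int
  | 0 => result
  | p + 1 => pvALoop (x >>> (1 : Nat)) (PySem.Int.bor result ((PySem.Int.band x 1) <<< p)) p

def populate_reverse_bits (x : Int) : Int :=
  -- size = 16; position = size - 1 = 15; result = 0; loop while position >= 0
  pvALoop x 0 16

-- ===== PORT B =====
-- one entry of _REV8: int(format(i, '08b')[::-1], 2)  (i is 0..255, so format pads with '0';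
-- the index of _REV8 and the parse are always in range / valid, so .getD defaults never fire)
def pvRev8Entry (i : Int) : Int :=
  let b := PySem.Int.toBinChars i
  let s := List.replicate (8 - b.length) '0' ++ b     -- format(i, '08b') for 0 <= i < 256
  ((PySem.Int.ofCharsBase? s.reverse 2).getD 0)       -- int(s[::-1], 2); s[::-1] is List.reverse

-- _REV8 = [int(format(i, '08b')[::-1], 2) for i in range(256)]
def pvRev8 : List Int := (PySem.List.pyRange 0 256 1).map pvRev8Entry

def populate_reverse_bits_alt (x : Int) : Int :=
  -- hi, lo = divmod(x & 0xFFFF, 256)   (divisor 256 != 0, so divmod? is always some)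
  let hl := (PySem.Int.divmod? (PySem.Int.band x 65535) 256).getD (0, 0)
  PySem.List.pyGetD pvRev8 hl.2 0 * 256 + PySem.List.pyGetD pvRev8 hl.1 0

-- ===== PRECONDITION & SPEC =====
def Spec_populate_reverse_bits (x : Int) (out : Int) : Prop := out = populate_reverse_bits_alt x
instance (x : Int) (out : Int) : Decidable (Spec_populate_reverse_bits x out) := by unfold Spec_populate_reverse_bits; infer_instance

-- ===== CLAIM (what is proved, stated in full; the proofs are below) =====
def Claim_equal_populate_reverse_bits : Prop := ∀ (x : Int), Dom_populate_reverse_bits x → Spec_populate_reverse_bits x (populate_reverse_bits x)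

-- ===== LEMMAS AND PROOFS =====

-- Reversal of the low k bits of x, MSB of the output taken from bit 0 of x.
def pvRevI : Nat → Int → Int
  | 0, _ => 0
  | k + 1, x => (x % 2) * 2 ^ k + pvRevI k (x / 2)

-- Nat bit facts used for A's `result |= bit << p` accumulation
theorem pv_lor_mul_pow (a b k : Nat) : (a * 2 ^ k) ||| (b * 2 ^ k) = (a ||| b) * 2 ^ k := by
  induction k with
  | zero => simp
  | succ k ih =>
    have h := Nat.lor_bit false (a * 2 ^ k) false (b * 2 ^ k)
    simp only [Nat.bit, Bool.or_self, cond_false] at h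
    calc a * 2 ^ (k + 1) ||| b * 2 ^ (k + 1)
        = 2 * (a * 2 ^ k) ||| 2 * (b * 2 ^ k) := by ring_nf
      _ = 2 * ((a * 2 ^ k) ||| (b * 2 ^ k)) := h
      _ = (a ||| b) * 2 ^ (k + 1) := by rw [ih]; ring

theorem pv_two_mul_lor (c b : Nat) (hb : b ≤ 1) : (2 * c) ||| b = 2 * c + b := by
  interval_cases b
  · simp
  · have h := Nat.lor_bit false c true 0
    simpa [Nat.bit] using h

theorem pv_acc_lor (c b k : Nat) (hb : b ≤ 1) :
    (c * 2 ^ (k + 1)) ||| (b * 2 ^ k) = (2 * c + b) * 2 ^ k := by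
  have h1 : c * 2 ^ (k + 1) = (2 * c) * 2 ^ k := by ring
  rw [h1, pv_lor_mul_pow, pv_two_mul_lor c b hb]

-- A's loop computes the accumulated reversal
theorem pvALoop_eq (k : Nat) : ∀ (x : Int) (c : Nat),
    pvALoop x (↑(c * 2 ^ k)) k = ↑(c * 2 ^ k) + pvRevI k x := by
  induction k with
  | zero => intro x c; simp [pvALoop, pvRevI]
  | succ k ih =>
    intro x c
    have hband : PySem.Int.band x 1 = x % 2 := by
      rw [PySem.Int.band_one, PySem.Int.mod_eq_emod_of_pos (by norm_num)]
    have hshr : x >>> (1 : Nat) = x / 2 := by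
      have := Int.shiftRight_eq_div_pow x 1; norm_num at this; exact this
    have hb2 : x % 2 = 0 ∨ x % 2 = 1 := Int.emod_two_eq_zero_or_one x
    have harg : PySem.Int.bor (↑(c * 2 ^ (k + 1))) ((PySem.Int.band x 1) <<< k)
        = ↑((2 * c + (x % 2).toNat) * 2 ^ k) := by
      rw [hband, Int.shiftLeft_eq]
      rw [PySem.Int.bor_of_nonneg (by positivity) (by rcases hb2 with h | h <;> rw [h] <;> positivity)]
      congr 1
      have hp : ((2:Int) ^ k).toNat = 2 ^ k := by
        rw [show ((2:Int)) ^ k = ((2 ^ k : Nat) : Int) by push_cast; ring, Int.toNat_natCast]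
      have htn : ((x % 2) * 2 ^ k).toNat = (x % 2).toNat * 2 ^ k := by
        rcases hb2 with h | h <;> rw [h] <;> simp [hp]
      rw [Int.toNat_natCast, htn]
      exact pv_acc_lor c (x % 2).toNat k (by rcases hb2 with h | h <;> simp [h])
    show pvALoop (x >>> (1 : Nat)) (PySem.Int.bor (↑(c * 2 ^ (k + 1))) ((PySem.Int.band x 1) <<< k)) k
        = ↑(c * 2 ^ (k + 1)) + pvRevI (k + 1) x
    rw [harg, hshr, ih (x / 2) (2 * c + (x % 2).toNat)]
    show ((((2 * c + (x % 2).toNat) * 2 ^ k : Nat) : Int)) + pvRevI k (x / 2)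
        = ↑(c * 2 ^ (k + 1)) + ((x % 2) * 2 ^ k + pvRevI k (x / 2))
    rcases hb2 with h | h <;> rw [h] <;> push_cast <;> ring

theorem pvA_eq_revI (x : Int) : populate_reverse_bits x = pvRevI 16 x := by
  have h := pvALoop_eq 16 x 0
  simpa [populate_reverse_bits] using h

-- pvRevI only reads the low k bits
theorem pvRevI_emod (k : Nat) : ∀ x : Int, pvRevI k (x % 2 ^ k) = pvRevI k x := by
  induction k with
  | zero => intro x; simp [pvRevI]
  | succ k ih =>
    intro x
    have h2 : ((2 : Int)) ∣ 2 ^ (k + 1) := dvd_pow_self 2 (Nat.succ_ne_zero k)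
    have hmod : x % 2 ^ (k + 1) % 2 = x % 2 := Int.emod_emod_of_dvd x h2
    have hdiv : x % 2 ^ (k + 1) / 2 = (x / 2) % 2 ^ k := by
      have hq : x / 2 / 2 ^ k = x / 2 ^ (k + 1) := by
        rw [Int.ediv_ediv_of_nonneg (by norm_num)]; ring_nf
      have hdef : x % 2 ^ (k + 1) = x - 2 ^ (k + 1) * (x / 2 ^ (k + 1)) := Int.emod_def x _
      have : x - 2 ^ (k + 1) * (x / 2 ^ (k + 1)) = x + (-(2 ^ k * (x / 2 ^ (k + 1)))) * 2 := by ring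
      rw [hdef, this, Int.add_mul_ediv_right _ _ (by norm_num : (2:Int) ≠ 0), ← hq,
        Int.emod_def]
      ring
    show (x % 2 ^ (k + 1) % 2) * 2 ^ k + pvRevI k (x % 2 ^ (k + 1) / 2)
        = (x % 2) * 2 ^ k + pvRevI k (x / 2)
    rw [hmod, hdiv, ih (x / 2)]

-- pvRevI splits at a byte boundary
theorem pvRevI_add (j : Nat) : ∀ (k : Nat) (x : Int),
    pvRevI (j + k) x = pvRevI j x * 2 ^ k + pvRevI k (x / 2 ^ j) := by
  induction j with
  | zero => intro k x; simp [pvRevI]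
  | succ j ih =>
    intro k x
    have hadd : j + 1 + k = (j + k) + 1 := by omega
    rw [hadd]
    show (x % 2) * 2 ^ (j + k) + pvRevI (j + k) (x / 2)
        = ((x % 2) * 2 ^ j + pvRevI j (x / 2)) * 2 ^ k + pvRevI k (x / 2 ^ (j + 1))
    rw [ih k (x / 2)]
    have hq : x / 2 / 2 ^ j = x / 2 ^ (j + 1) := by
      rw [Int.ediv_ediv_of_nonneg (by norm_num)]; ring_nf
    rw [hq]; ring

-- x & 0xFFFF is x mod 2^16 (Python-exact, also for negative x)
theorem pv_band_mask (x : Int) : PySem.Int.band x 65535 = x % 65536 := by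
  unfold PySem.Int.band
  rcases (by omega : 0 ≤ x ∨ x < 0) with hx | hx
  · rw [if_pos hx, if_pos (by norm_num : (0:Int) ≤ 65535)]
    have h : x.toNat &&& (65535 : Int).toNat = x.toNat % 65536 := by
      have := Nat.and_two_pow_sub_one_eq_mod x.toNat 16
      norm_num at this ⊢; exact this
    rw [h]; omega
  · rw [if_neg (not_le.mpr hx), if_pos (by norm_num : (0:Int) ≤ 65535)]
    have h : (65535 : Int).toNat &&& (-x - 1).toNat = (-x - 1).toNat % 65536 := by
      have := Nat.and_two_pow_sub_one_eq_mod (-x - 1).toNat 16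
      norm_num at this ⊢; rw [Nat.land_comm]; exact this
    rw [h]; omega

-- the table agrees with pvRevI 8 on every byte (finite check)
set_option maxRecDepth 100000 in
theorem pv_table (n : Nat) (h : n < 256) :
    PySem.List.pyGetD pvRev8 (↑n) 0 = pvRevI 8 (↑n) := by
  revert h
  revert n
  decide

theorem pv_final : ∀ x : Int, populate_reverse_bits x = populate_reverse_bits_alt x := by
  intro x
  rw [pvA_eq_revI]
  have h256 : ¬ ((256:Int) = 0) := by norm_num
  have hfd : (x % 65536).fdiv 256 = x % 65536 / 256 :=
    Int.fdiv_eq_ediv_of_nonneg _ (by norm_num)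
  have hfm : (x % 65536).fmod 256 = x % 65536 % 256 :=
    Int.fmod_eq_emod_of_nonneg _ (by norm_num)
  simp only [populate_reverse_bits_alt, pv_band_mask, PySem.Int.divmod?, if_neg h256,
    Option.getD_some, hfd, hfm]
  have e1 : PySem.List.pyGetD pvRev8 (x % 65536 % 256) 0 = pvRevI 8 (x % 65536 % 256) := by
    rw [show x % 65536 % 256 = ↑((x % 65536 % 256).toNat) by omega]
    exact pv_table _ (by omega)
  have e2 : PySem.List.pyGetD pvRev8 (x % 65536 / 256) 0 = pvRevI 8 (x % 65536 / 256) := by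
    rw [show x % 65536 / 256 = ↑((x % 65536 / 256).toNat) by omega]
    exact pv_table _ (by omega)
  rw [e1, e2]
  have h16 : pvRevI 16 x = pvRevI 8 x * 2 ^ 8 + pvRevI 8 (x / 2 ^ 8) := pvRevI_add 8 8 x
  have hm1 : pvRevI 8 (x % 2 ^ 8) = pvRevI 8 x := pvRevI_emod 8 x
  have hm2 : pvRevI 8 ((x / 256) % 2 ^ 8) = pvRevI 8 (x / 256) := pvRevI_emod 8 (x / 256)
  norm_num at h16 hm1 hm2
  rw [h16, ← hm1, ← hm2,
    show x % 256 = x % 65536 % 256 by omega,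
    show x / 256 % 256 = x % 65536 / 256 by omega]

-- ===== VERDICT (by name: the statement is the Claim_ definition above) =====
theorem populate_reverse_bits_spec : Claim_equal_populate_reverse_bits := by
  intro x _
  show populate_reverse_bits x = populate_reverse_bits_alt x
  exact pv_final x
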